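-- pv_equiv track=rewrite | github.com/hawkrives/gobbldygook | course.py | cleanTitle
-- ===== SOURCE A (Python) =====
-- def cleanTitle(string):
-- 	badEndings = [
-- 		" Admission by",
-- 		" Class will",
-- 		" Closed",
-- 		" During course submission process",
-- 		" Especially for ",
-- 		" Enrollment by",
-- 		" Film screenings",
-- 		" First-years "
-- 		" First-Year Students",
-- 		" Focuses on",
-- 		" Lab times to be arranged.",
-- 		" Limited to",
-- 		" New course",
-- 		" Not open to first-year students.",
-- 		" Note:",
-- 		" No prerequisite",
-- 		" Nursing ",
-- 		" Only open ",
-- 		" Open only ",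
-- 		" Open to ",
-- 		" Discuss",
-- 		" Permission of ",
-- 		" Please note ",
-- 		" Prereq",
-- 		" Registration",
-- 		" Taught in English.",
-- 		" The focus of this course",
-- 		" Thyis is an",
-- 		" This is an",
-- 		" This course",
-- 		" This lab has been canceled.",
-- 		" Students in ",
-- 		" You may "
-- 	]
--
-- 	badBeginnings = [
-- 		"Top: ",
-- 		"Sem: ",
-- 		"Res: "
-- 	]
--
-- 	for ending in badEndings:
-- 		string = string.split(ending)[0]
--
-- 	for beginning in badBeginnings:
-- 		if beginning in string:
-- 			string = string.split(beginning)[1]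
--
-- 	string.strip()
--
-- 	return string
-- ===== SOURCE B (Python) =====
-- def cleanTitle(string):
-- 	badEndings = [
-- 		" Admission by",
-- 		" Class will",
-- 		" Closed",
-- 		" During course submission process",
-- 		" Especially for ",
-- 		" Enrollment by",
-- 		" Film screenings",
-- 		" First-years "
-- 		" First-Year Students",
-- 		" Focuses on",
-- 		" Lab times to be arranged.",
-- 		" Limited to",
-- 		" New course",
-- 		" Not open to first-year students.",
-- 		" Note:",
-- 		" No prerequisite",
-- 		" Nursing ",
-- 		" Only open ",
-- 		" Open only ",
-- 		" Open to ",
-- 		" Discuss",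
-- 		" Permission of ",
-- 		" Please note ",
-- 		" Prereq",
-- 		" Registration",
-- 		" Taught in English.",
-- 		" The focus of this course",
-- 		" Thyis is an",
-- 		" This is an",
-- 		" This course",
-- 		" This lab has been canceled.",
-- 		" Students in ",
-- 		" You may "
-- 	]
--
-- 	badBeginnings = [
-- 		"Top: ",
-- 		"Sem: ",
-- 		"Res: "
-- 	]
--
-- 	# One index-gathering pass over the ORIGINAL string: an ending only cuts
-- 	# when it still fits entirely inside the current kept prefix.
-- 	cut = len(string)
-- 	for ending in badEndings:
-- 		i = string.find(ending)
-- 		if i != -1 and i + len(ending) <= cut: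
-- 			cut = i
-- 	string = string[:cut]
--
-- 	for beginning in badBeginnings:
-- 		if beginning in string:
-- 			string = string.split(beginning)[1]
--
-- 	return string
-- ===== Notes on version B (the rewrite author's own statement) =====
-- stated objective: alternative
-- what changed: The endings loop no longer repeatedly splits and rebinds a shrinking string: B makes one index-gathering pass over the original string (string.find per ending, keeping the minimal cut index among occurrences that fit entirely inside the current kept prefix) and slices once at the end; the beginnings loop is unchanged and A's dead string.strip() is dropped.
import Mathlib
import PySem

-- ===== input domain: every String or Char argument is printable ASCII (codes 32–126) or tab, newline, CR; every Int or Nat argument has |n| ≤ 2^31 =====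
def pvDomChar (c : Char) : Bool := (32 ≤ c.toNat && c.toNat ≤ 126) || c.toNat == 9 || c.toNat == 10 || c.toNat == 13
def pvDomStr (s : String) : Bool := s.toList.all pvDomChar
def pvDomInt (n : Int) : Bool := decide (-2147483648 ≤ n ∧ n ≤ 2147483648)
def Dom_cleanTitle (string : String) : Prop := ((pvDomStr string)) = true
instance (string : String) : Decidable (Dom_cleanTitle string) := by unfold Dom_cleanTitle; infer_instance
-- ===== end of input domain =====

-- B replaces A's shrinking-string endings loop by one index-gathering pass over the
-- original string (minimal fitting find index, then a single slice); the beginnings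
-- loop and A's dead `string.strip()` (result discarded in Python, so no effect) stay.

-- shared constant lists (verbatim from the Python, including the accidental
-- adjacent-string concatenation producing the " First-years  First-Year Students" entry)
def pvBadEndings : List String := [
  " Admission by",
  " Class will",
  " Closed",
  " During course submission process",
  " Especially for ",
  " Enrollment by",
  " Film screenings",
  " First-years  First-Year Students",
  " Focuses on",
  " Lab times to be arranged.",
  " Limited to",
  " New course",
  " Not open to first-year students.",
  " Note:",
  " No prerequisite",
  " Nursing ",
  " Only open ",
  " Open only ",
  " Open to ",
  " Discuss",
  " Permission of ",
  " Please note ",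
  " Prereq",
  " Registration",
  " Taught in English.",
  " The focus of this course",
  " Thyis is an",
  " This is an",
  " This course",
  " This lab has been canceled.",
  " Students in ",
  " You may "
]

def pvBadBeginnings : List String := ["Top: ", "Sem: ", "Res: "]

-- ===== PORT A =====
-- string.split(ending)[0]: the separators are nonempty literals, so split? is some;
-- split always yields a nonempty list, so [0] is its head.
-- string.split(beginning)[1]: guarded by `beginning in string`, so part 1 exists.
def cleanTitle (string : String) : String :=
  let s1 := pvBadEndings.foldl
    (fun s e => (((PySem.Str.split? s e).getD []).headD "")) string
  let s2 := pvBadBeginnings.foldl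
    (fun s b => if PySem.Str.isIn b s then ((PySem.Str.split? s b).getD []).getD 1 "" else s) s1
  -- `string.strip()` in A: value discarded, no effect
  s2

-- ===== PORT B =====
def cleanTitle_alt (string : String) : String :=
  let cut := pvBadEndings.foldl
    (fun cut e =>
      let i := PySem.Str.find string e
      if i ≠ -1 ∧ i + PySem.Str.len e ≤ cut then i else cut)
    (PySem.Str.len string)
  let t := PySem.Str.slice string none (some cut)
  pvBadBeginnings.foldl
    (fun s b => if PySem.Str.isIn b s then ((PySem.Str.split? s b).getD []).getD 1 "" else s) t

-- ===== PRECONDITION & SPEC =====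
def Spec_cleanTitle (string : String) (out : String) : Prop := out = cleanTitle_alt string
instance (string : String) (out : String) : Decidable (Spec_cleanTitle string out) := by unfold Spec_cleanTitle; infer_instance

-- ===== CLAIM (what is proved, stated in full; the proofs are below) =====
def Claim_equal_cleanTitle : Prop := ∀ (string : String), Dom_cleanTitle string → Spec_cleanTitle string (cleanTitle string)

-- ===== LEMMAS AND PROOFS =====

theorem find_eq_of {l e : List Char} {j : Nat}
    (h1 : e <+: l.drop j) (h2 : ∀ i < j, ¬ e <+: l.drop i) :
    PySem.Chars.find l e = j := by
  have hin : PySem.Chars.isIn e l = true := (PySem.Chars.exists_prefix_drop_iff_isIn e l).mp ⟨j, h1⟩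
  have hnn : 0 ≤ PySem.Chars.find l e := by
    rw [PySem.Chars.find_nonneg_iff]
    exact (PySem.Chars.isIn_iff_infix _ _).mp hin
  obtain ⟨hp, hmin⟩ := PySem.Chars.find_spec hnn
  have hj : (PySem.Chars.find l e).toNat = j := by
    rcases lt_trichotomy (PySem.Chars.find l e).toNat j with h|h|h
    · exact absurd hp (h2 _ h)
    · exact h
    · exact absurd h1 (hmin j h)
  omega


theorem find_cons_pos {l e : List Char} (h : e <+: l) : PySem.Chars.find l e = 0 :=
  find_eq_of (j := 0) (by simpa using h) (fun i hi => absurd hi (Nat.not_lt_zero i))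

theorem find_cons_neg {c : Char} {rest e : List Char} (h : ¬ e <+: (c :: rest)) :
    PySem.Chars.find (c :: rest) e
      = if PySem.Chars.find rest e = -1 then -1 else PySem.Chars.find rest e + 1 := by
  by_cases hr : PySem.Chars.find rest e = -1
  · rw [if_pos hr]
    rw [PySem.Chars.find_eq_neg_one_iff] at hr ⊢
    intro hin
    rcases List.infix_cons_iff.mp hin with hpre | hinf
    · exact h hpre
    · exact hr hinf
  · rw [if_neg hr]
    have hnn : 0 ≤ PySem.Chars.find rest e := by
      have := PySem.Chars.neg_one_le_find rest e; omega
    obtain ⟨hp, hmin⟩ := PySem.Chars.find_spec hnn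
    have := find_eq_of (l := c :: rest) (e := e) (j := (PySem.Chars.find rest e).toNat + 1)
      (by simpa using hp)
      (by
        intro i hi
        cases i with
        | zero => simpa using h
        | succ i => exact fun hpre => hmin i (by omega) (by simpa using hpre))
    rw [this]; omega

theorem go_acc (sep : List Char) (fuel : Nat) : ∀ (l cur : List Char) (acc : List (List Char)),
    PySem.Chars.splitOn.go sep fuel l cur acc
      = acc.reverse ++ PySem.Chars.splitOn.go sep fuel l cur [] := by
  induction fuel with
  | zero => intro l cur acc; simp [PySem.Chars.splitOn.go]
  | succ fuel ih =>
    intro l cur acc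
    cases l with
    | nil => simp [PySem.Chars.splitOn.go]
    | cons c rest =>
      simp only [PySem.Chars.splitOn.go]
      by_cases h : sep.isPrefixOf (c :: rest)
      · simp only [h, if_true]
        rw [ih _ _ (cur.reverse :: acc), ih _ _ [cur.reverse]]
        simp
      · rw [if_neg h, if_neg h]
        exact ih _ _ acc

theorem go_head {e : List Char} (he : e ≠ []) (fuel : Nat) : ∀ (l cur : List Char),
    l.length < fuel →
    (PySem.Chars.splitOn.go e fuel l cur []).headD []
      = cur.reverse ++ (if PySem.Chars.find l e = -1 then l
          else l.take (PySem.Chars.find l e).toNat) := by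
  induction fuel with
  | zero => intro l cur h; omega
  | succ fuel ih =>
    intro l cur hlen
    cases l with
    | nil =>
      have hf : PySem.Chars.find [] e = -1 := by
        rw [PySem.Chars.find_eq_neg_one_iff, List.infix_nil]; exact he
      simp [PySem.Chars.splitOn.go, hf]
    | cons c rest =>
      simp only [PySem.Chars.splitOn.go]
      by_cases hp : e.isPrefixOf (c :: rest)
      · rw [if_pos hp, go_acc]
        have hf : PySem.Chars.find (c :: rest) e = 0 :=
          find_cons_pos (List.isPrefixOf_iff_prefix.mp hp)
        simp [hf]
      · rw [if_neg hp]
        rw [ih rest (c :: cur) (by simp at hlen ⊢; omega)]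
        have hnp : ¬ e <+: (c :: rest) := fun hh => hp (List.isPrefixOf_iff_prefix.mpr hh)
        rw [find_cons_neg hnp]
        by_cases hr : PySem.Chars.find rest e = -1
        · simp [hr]
        · have hnn : 0 ≤ PySem.Chars.find rest e := by
            have := PySem.Chars.neg_one_le_find rest e; omega
          rw [if_neg hr, if_neg hr, if_neg (by omega)]
          have : (PySem.Chars.find rest e + 1).toNat = (PySem.Chars.find rest e).toNat + 1 := by
            omega
          simp [this]

theorem splitOn_head {e l : List Char} (he : e ≠ []) :
    (PySem.Chars.splitOn l e).headD []
      = (if PySem.Chars.find l e = -1 then l else l.take (PySem.Chars.find l e).toNat) := by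
  have := go_head he (l.length + 1) l [] (by omega)
  simpa [PySem.Chars.splitOn] using this

theorem find_take {s e : List Char} {k : Nat} (he : e ≠ []) :
    PySem.Chars.find (s.take k) e
      = if 0 ≤ PySem.Chars.find s e ∧ (PySem.Chars.find s e).toNat + e.length ≤ k
          then PySem.Chars.find s e else -1 := by
  have hlen : 1 ≤ e.length := by cases e with | nil => simp at he | cons a b => simp
  by_cases h0 : 0 ≤ PySem.Chars.find s e ∧ (PySem.Chars.find s e).toNat + e.length ≤ k
  · rw [if_pos h0]
    obtain ⟨hp, hmin⟩ := PySem.Chars.find_spec h0.1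
    have := find_eq_of (l := s.take k) (e := e) (j := (PySem.Chars.find s e).toNat)
      (by
        rw [List.drop_take, List.prefix_take_iff]
        exact ⟨hp, by omega⟩)
      (by
        intro i hi hpre
        rw [List.drop_take, List.prefix_take_iff] at hpre
        exact hmin i hi hpre.1)
    rw [this]; omega
  · rw [if_neg h0]
    rw [PySem.Chars.find_eq_neg_one_iff]
    intro hin
    obtain ⟨j, hj⟩ := (PySem.Chars.exists_prefix_drop_iff_isIn e (s.take k)).mpr
      ((PySem.Chars.isIn_iff_infix _ _).mpr hin)
    rw [List.drop_take, List.prefix_take_iff] at hj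
    have hins : PySem.Chars.isIn e s = true :=
      (PySem.Chars.exists_prefix_drop_iff_isIn e s).mp ⟨j, hj.1⟩
    have hnn : 0 ≤ PySem.Chars.find s e := by
      rw [PySem.Chars.find_nonneg_iff]
      exact (PySem.Chars.isIn_iff_infix _ _).mp hins
    obtain ⟨hp, hmin⟩ := PySem.Chars.find_spec hnn
    have hjge : (PySem.Chars.find s e).toNat ≤ j := by
      by_contra hlt
      exact hmin j (by omega) hj.1
    omega

theorem step_take {s e : List Char} {k : Int} (he : e ≠ [])
    (hk0 : 0 ≤ k) :
    (PySem.Chars.splitOn (s.take k.toNat) e).headD []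
      = s.take ((if PySem.Chars.find s e ≠ -1 ∧ PySem.Chars.find s e + e.length ≤ k
          then PySem.Chars.find s e else k).toNat) := by
  have hlen : 1 ≤ e.length := by cases e with | nil => simp at he | cons a b => simp
  have hneg := PySem.Chars.neg_one_le_find s e
  rw [splitOn_head he, find_take he (k := k.toNat)]
  by_cases h0 : 0 ≤ PySem.Chars.find s e ∧ (PySem.Chars.find s e).toNat + e.length ≤ k.toNat
  · rw [if_pos h0, if_neg (by omega), if_pos (by constructor <;> omega), List.take_take]
    congr 1
    omega
  · rw [if_neg h0, if_pos rfl, if_neg (by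
      intro hc
      exact h0 ⟨by omega, by omega⟩)]

theorem fold_take (s : List Char) (L : List String) (hL : ∀ e ∈ L, e.toList ≠ []) :
    ∀ (k : Int), 0 ≤ k →
    0 ≤ L.foldl (fun c e =>
          let i := PySem.Chars.find s e.toList
          if i ≠ -1 ∧ i + e.toList.length ≤ c then i else c) k
    ∧ L.foldl (fun t e => (PySem.Chars.splitOn t e.toList).headD []) (s.take k.toNat)
      = s.take ((L.foldl (fun c e =>
            let i := PySem.Chars.find s e.toList
            if i ≠ -1 ∧ i + e.toList.length ≤ c then i else c) k).toNat) := by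
  induction L with
  | nil => intro k hk0; exact ⟨hk0, rfl⟩
  | cons e L ih =>
    intro k hk0
    have he : e.toList ≠ [] := hL e (by simp)
    have hneg := PySem.Chars.neg_one_le_find s e.toList
    have hk0' : 0 ≤ (if PySem.Chars.find s e.toList ≠ -1 ∧
        PySem.Chars.find s e.toList + e.toList.length ≤ k
        then PySem.Chars.find s e.toList else k) := by
      split_ifs with h
      · omega
      · exact hk0
    have hstep := step_take (s := s) (k := k) he hk0
    obtain ⟨hb, hrec⟩ := ih (fun x hx => hL x (by simp [hx])) _ hk0'
    refine ⟨by simpa using hb, ?_⟩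
    simp only [List.foldl_cons]
    rw [hstep]
    simpa using hrec

theorem strA_step (t e : String) (he : e.toList ≠ []) :
    (((PySem.Str.split? t e).getD []).headD "").toList
      = (PySem.Chars.splitOn t.toList e.toList).headD [] := by
  have hne : e.toList.isEmpty = false := by
    cases h : e.toList with
    | nil => exact absurd h he
    | cons a b => simp
  cases h : PySem.Chars.splitOn t.toList e.toList with
  | nil => simp [PySem.Str.split?, PySem.Chars.split?, hne, h]
  | cons p ps => simp [PySem.Str.split?, PySem.Chars.split?, hne, h]

theorem strA_fold (L : List String) (hL : ∀ e ∈ L, e.toList ≠ []) :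
    ∀ (t : String),
    (L.foldl (fun s e => (((PySem.Str.split? s e).getD []).headD "")) t).toList
      = L.foldl (fun l e => (PySem.Chars.splitOn l e.toList).headD []) t.toList := by
  induction L with
  | nil => intro t; rfl
  | cons e L ih =>
    intro t
    simp only [List.foldl_cons]
    rw [ih (fun x hx => hL x (by simp [hx]))]
    rw [strA_step t e (hL e (by simp))]

theorem endings_nonempty : ∀ e ∈ pvBadEndings, e.toList ≠ [] := by decide

theorem cut_folds_eq (string : String) :
    pvBadEndings.foldl
      (fun cut e =>
        let i := PySem.Str.find string e
        if i ≠ -1 ∧ i + PySem.Str.len e ≤ cut then i else cut)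
      (PySem.Str.len string)
    = pvBadEndings.foldl
      (fun c e =>
        let i := PySem.Chars.find string.toList e.toList
        if i ≠ -1 ∧ i + e.toList.length ≤ c then i else c)
      (string.toList.length : Int) := by
  have hf : (fun (cut : Int) (e : String) =>
        let i := PySem.Str.find string e
        if i ≠ -1 ∧ i + PySem.Str.len e ≤ cut then i else cut)
      = (fun (c : Int) (e : String) =>
        let i := PySem.Chars.find string.toList e.toList
        if i ≠ -1 ∧ i + e.toList.length ≤ c then i else c) := by
    funext c e
    simp [PySem.Str.find_eq, PySem.Str.len_eq]
  rw [hf, PySem.Str.len_eq]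

-- ===== VERDICT (by name: the statement is the Claim_ definition above) =====
set_option maxRecDepth 8192 in
theorem stage1_eq (string : String) :
    pvBadEndings.foldl (fun s e => (((PySem.Str.split? s e).getD []).headD "")) string
      = PySem.Str.slice string none
          (some (pvBadEndings.foldl
            (fun cut e =>
              let i := PySem.Str.find string e
              if i ≠ -1 ∧ i + PySem.Str.len e ≤ cut then i else cut)
            (PySem.Str.len string))) := by
  apply String.toList_inj.mp
  have hk0 : (0 : Int) ≤ (string.toList.length : Int) := by positivity
  obtain ⟨hcut0, hfold⟩ := fold_take string.toList pvBadEndings endings_nonempty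
    (string.toList.length : Int) hk0
  rw [strA_fold pvBadEndings endings_nonempty string]
  rw [PySem.Str.toList_slice, PySem.Chars.slice_eq_listSlice, cut_folds_eq,
    PySem.List.slice_to _ hcut0]
  rw [show ((string.toList.length : Int)).toNat = string.toList.length from Int.toNat_natCast _,
    List.take_length] at hfold
  exact hfold

set_option maxRecDepth 8192 in
theorem cleanTitle_spec : Claim_equal_cleanTitle := by
  intro string _
  show cleanTitle string = cleanTitle_alt string
  simp only [cleanTitle, cleanTitle_alt]
  rw [stage1_eq string]
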